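-- pv_equiv track=rewrite | github.com/sbarczyk/WDI | Pycharm/Kolokwia/Kolokwium - 1/kol_21_22_zad_1_B..py | zad
-- ===== SOURCE A (Python) =====
-- from math import isqrt
--
-- def is_prime(x):
--     if x == 2 or x == 3:
--         return True
--     if x <= 1 or x % 2 == 0 or x % 3 == 0:
--         return False
--     for i in range(6, isqrt(x) + 1, 6):
--         if x % (i - 1) == 0 or x % (i + 1) == 0:
--             return False
--     return True
--
-- def zad(T):
--     n = len(T)
--     max_ind = None
--     iloczyn = 0
--     for i, element in enumerate(T):
--         if is_prime(element):
--             if iloczyn == 0: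
--                 iloczyn = element
--             else:
--                 iloczyn *= element
--         elif iloczyn == element:
--             max_ind = i
--     return max_ind
--
-- T = [1, 2, 3, 8, 10, 11, 66]
-- ===== SOURCE B (Python) =====
-- from math import isqrt
--
-- def is_prime(x):
--     if x == 2 or x == 3:
--         return True
--     if x <= 1 or x % 2 == 0 or x % 3 == 0:
--         return False
--     for i in range(6, isqrt(x) + 1, 6):
--         if x % (i - 1) == 0 or x % (i + 1) == 0:
--             return False
--     return True
--
-- def zad(T):
--     # pass 1: prefix[i] = product of primes among T[:i] (0 until the first prime)
--     prefix = []
--     p = 0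
--     for x in T:
--         prefix.append(p)
--         if is_prime(x):
--             p = x if p == 0 else p * x
--     # pass 2: scan from the back, return the first (i.e. last) matching index
--     for i, (x, q) in reversed(list(enumerate(zip(T, prefix)))):
--         if not is_prime(x) and q == x:
--             return i
--     return None
-- ===== Notes on version B (the rewrite author's own statement) =====
-- stated objective: alternative
-- what changed: A's single accumulating loop (running prime product + last-match index) is split into two passes: first build a prefix-product table of primes seen so far, then scan from the back and return early at the first matching index.
import Mathlib
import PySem

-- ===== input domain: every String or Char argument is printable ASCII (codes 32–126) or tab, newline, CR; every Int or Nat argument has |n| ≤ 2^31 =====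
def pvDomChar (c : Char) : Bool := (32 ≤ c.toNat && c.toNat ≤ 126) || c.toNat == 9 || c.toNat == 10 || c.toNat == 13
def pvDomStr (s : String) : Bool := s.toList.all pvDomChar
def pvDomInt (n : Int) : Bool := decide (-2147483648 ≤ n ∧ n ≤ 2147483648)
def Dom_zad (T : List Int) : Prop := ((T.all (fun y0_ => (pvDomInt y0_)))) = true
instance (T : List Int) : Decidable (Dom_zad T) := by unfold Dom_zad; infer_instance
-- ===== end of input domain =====

-- B replaces A's single accumulating loop by two passes — build a prefix-product
-- table, then scan backward with early return on the first (= last) match;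
-- objective: alternative decomposition, same cost.

-- ===== PORT A =====
-- is_prime, shared module helper (6k±1 trial division); the loop with early
-- 'return False' is ported as .any over the same range.
def isPrimeP (x : Int) : Bool :=
  if x = 2 ∨ x = 3 then true
  else if x ≤ 1 ∨ PySem.Int.mod x 2 = 0 ∨ PySem.Int.mod x 3 = 0 then false
  else !((PySem.List.pyRange 6 ((Nat.sqrt x.toNat : Int) + 1) 6).any
        (fun i => PySem.Int.mod x (i - 1) == 0 || PySem.Int.mod x (i + 1) == 0))

-- A's loop body: state (max_ind, iloczyn)
def stepA (st : Option Int × Int) (ix : Int × Int) : Option Int × Int :=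
  if isPrimeP ix.2 then
    if st.2 = 0 then (st.1, ix.2) else (st.1, st.2 * ix.2)
  else if st.2 = ix.2 then (some ix.1, st.2)
  else st

def zad (T : List Int) : Option Int :=
  ((PySem.List.enumerate T).foldl stepA (none, 0)).1

-- ===== PORT B =====
-- pass 1 body: state (prefix, p); prefix.append(p), then update p
def stepB (st : List Int × Int) (x : Int) : List Int × Int :=
  let pre := st.1 ++ [st.2]
  if isPrimeP x then (pre, if st.2 = 0 then x else st.2 * x) else (pre, st.2)

-- pass 2 condition: not is_prime(x) and q == x
def condB (p : Int × Int × Int) : Bool := !isPrimeP p.2.1 && decide (p.2.2 = p.2.1)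

def zad_alt (T : List Int) : Option Int :=
  let pre := (T.foldl stepB ([], 0)).1
  (((PySem.List.enumerate (T.zip pre)).reverse).find? condB).map (·.1)

-- ===== PRECONDITION & SPEC =====
def Spec_zad (T : List Int) (out : Option Int) : Prop := out = zad_alt T
instance (T : List Int) (out : Option Int) : Decidable (Spec_zad T out) := by unfold Spec_zad; infer_instance

-- ===== CLAIM (what is proved, stated in full; the proofs are below) =====
def Claim_equal_zad : Prop := ∀ (T : List Int), Dom_zad T → Spec_zad T (zad T)

-- ===== LEMMAS AND PROOFS =====

-- the product update, common shape of both loops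
def nextP (p x : Int) : Int := if isPrimeP x then (if p = 0 then x else p * x) else p

-- structural form of B's prefix table
def preAux (p : Int) : List Int → List Int
  | [] => []
  | x :: r => p :: preAux (nextP p x) r

theorem stepB_eq (st : List Int × Int) (x : Int) :
    stepB st x = (st.1 ++ [st.2], nextP st.2 x) := by
  simp [stepB, nextP]; split <;> rfl

theorem build_eq : ∀ (T : List Int) (acc : List Int) (p : Int),
    (T.foldl stepB (acc, p)).1 = acc ++ preAux p T := by
  intro T
  induction T with
  | nil => intro acc p; simp [preAux]
  | cons x r ih =>
      intro acc p
      simp only [List.foldl_cons, stepB_eq, preAux, ih]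
      simp

def findB (T : List Int) (p : Int) (i0 : Int) : Option Int :=
  (((PySem.List.enumerate (T.zip (preAux p T)) i0).reverse).find? condB).map (·.1)

theorem stepA_eq (st : Option Int × Int) (ix : Int × Int) :
    stepA st ix = ((if condB (ix.1, ix.2, st.2) then some ix.1 else st.1), nextP st.2 ix.2) := by
  by_cases hp : isPrimeP ix.2
  · by_cases hz : st.2 = 0 <;> simp [stepA, nextP, condB, hp, hz]
  · by_cases hz : st.2 = ix.2 <;> simp [stepA, nextP, condB, hp, hz]

theorem main_lemma : ∀ (T : List Int) (m0 : Option Int) (p i0 : Int),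
    ((PySem.List.enumerate T i0).foldl stepA (m0, p)).1
      = (findB T p i0).elim m0 some := by
  intro T
  induction T with
  | nil => intro m0 p i0; simp [findB, preAux, PySem.List.enumerate_nil]
  | cons x r ih =>
      intro m0 p i0
      rw [PySem.List.enumerate_cons]
      simp only [List.foldl_cons, stepA_eq]
      rw [ih]
      simp only [findB, preAux, List.zip_cons_cons, PySem.List.enumerate_cons,
        List.reverse_cons, List.find?_append]
      cases hF : ((PySem.List.enumerate (r.zip (preAux (nextP p x) r)) (i0 + 1)).reverse).find? condB with
      | some z => simp
      | none =>
          simp only [List.find?_cons, List.find?_nil]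
          by_cases hc : condB (i0, x, p) <;> simp [hc]

theorem elim_none_some (o : Option Int) : o.elim none some = o := by cases o <;> rfl

-- ===== VERDICT (by name: the statement is the Claim_ definition above) =====
theorem zad_spec : Claim_equal_zad := by
  intro T _
  show zad T = zad_alt T
  unfold zad zad_alt
  rw [build_eq]
  rw [main_lemma]
  simp only [findB, List.nil_append, elim_none_some]
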